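-- pv_equiv track=rewrite | github.com/chatterboy/Lang | finder.py | qrypat2pats
-- ===== SOURCE A (Python) =====
-- def createCands(pos, tmp, cands, qrypat):
-- 	if pos == len(qrypat):
-- 		if len(tmp) > 0: cands.append(tmp)
-- 		return
-- 	if qrypat[pos][0] == '{' and qrypat[pos][-1] == '}':
-- 		s = int(qrypat[pos][1])
-- 		e = int(qrypat[pos][-2])
-- 		for i in range(s, e + 1):
-- 			nextTmp = []
-- 			for e in tmp: nextTmp.append(e)
-- 			nextTmp.append(i)
-- 			createCands(pos + 1, nextTmp, cands, qrypat)
-- 	else: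
-- 		createCands(pos + 1, tmp, cands, qrypat)
--
-- def qrypat2pats(qrypat):
-- 	tmp = []
-- 	cands = []
-- 	createCands(0, tmp, cands, qrypat)
-- 	pats = []
-- 	if len(cands) == 0:
-- 		pat = []
-- 		for i in range(len(qrypat)):
-- 			pat.append(qrypat[i])
-- 		pats.append(pat)
-- 	else:
-- 		for cand in cands:
-- 			i = 0
-- 			pat = []
-- 			for j in range(len(qrypat)):
-- 				if qrypat[j][0] == '{' and qrypat[j][-1] == '}':
-- 					for k in range(cand[i]):
-- 						pat.append('$')
-- 					i += 1
-- 				else: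
-- 					pat.append(qrypat[j])
-- 			pats.append(pat)
-- 	return pats
-- ===== SOURCE B (Python) =====
-- def qrypat2pats(qrypat):
--     # Extract the brace tokens' ranges once, take their cartesian product,
--     # then rebuild each pattern by substituting the combination back in.
--     ranges = [range(int(t[1]), int(t[-2]) + 1)
--               for t in qrypat if t[0] == '{' and t[-1] == '}']
--     cands = [[]]
--     for r in ranges:
--         cands = [c + [i] for c in cands for i in r]
--     if not cands:
--         return [list(qrypat)]
--     pats = []
--     for cand in cands:
--         it = iter(cand)
--         pat = []
--         for t in qrypat:
--             if t[0] == '{' and t[-1] == '}':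
--                 pat.extend('$' * next(it))
--             else:
--                 pat.append(t)
--         pats.append(pat)
--     return pats
-- ===== Notes on version B (the rewrite author's own statement) =====
-- stated objective: idiomatic
-- what changed: Replaced the recursive accumulator-threading enumeration (createCands) with a single comprehension extracting the brace ranges, an iterative cartesian-product fold, and an iterator-driven rebuild per combination.
-- outside the precondition, e.g. on qrypat2pats(['{3.1}', '{x}']): A returns [['{3.1}', '{x}']], B raises ValueError
import Mathlib
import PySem

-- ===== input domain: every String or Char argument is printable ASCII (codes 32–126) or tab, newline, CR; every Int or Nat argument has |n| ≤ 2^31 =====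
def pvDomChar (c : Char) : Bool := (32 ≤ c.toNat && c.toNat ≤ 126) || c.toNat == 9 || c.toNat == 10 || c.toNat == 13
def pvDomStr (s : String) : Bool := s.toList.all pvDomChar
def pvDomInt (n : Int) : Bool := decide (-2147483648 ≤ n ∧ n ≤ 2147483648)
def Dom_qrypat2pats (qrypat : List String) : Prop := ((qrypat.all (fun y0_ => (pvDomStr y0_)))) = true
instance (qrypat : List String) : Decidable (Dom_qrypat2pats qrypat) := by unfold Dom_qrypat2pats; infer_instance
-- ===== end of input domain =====

-- B replaces A's recursive accumulator-threading enumeration by a ranges-extraction +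
-- iterative cartesian-product fold + per-combination rebuild (idiomatic decomposition, same cost).

-- shared token helpers: both Pythons test t[0]=='{' and t[-1]=='}' and parse int(t[1]) / int(t[-2])
def pvBrace (t : String) : Bool :=
  (PySem.Str.pyGet? t 0 == some '{') && (PySem.Str.pyGet? t (-1) == some '}')

def pvIntAt (t : String) (i : Int) : Int :=
  ((PySem.Str.pyGet? t i).bind (fun c => PySem.Int.ofChars? [c])).getD 0

-- ===== PORT A =====
mutual
-- createCands(pos, tmp, cands, qrypat): recursion over the remaining suffix; cands threaded through
def pvCreateCands : List String → List Int → List (List Int) → List (List Int)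
  | [], tmp, cands => if tmp.length > 0 then cands ++ [tmp] else cands
  | t :: rest, tmp, cands =>
    if pvBrace t then
      pvCandLoop rest tmp cands (PySem.List.pyRange (pvIntAt t 1) (pvIntAt t (-2) + 1) 1)
    else pvCreateCands rest tmp cands
  termination_by rest _ _ => (rest.length, 0)
-- the 'for i in range(s, e + 1)' loop of createCands
def pvCandLoop : List String → List Int → List (List Int) → List Int → List (List Int)
  | _, _, cands, [] => cands
  | rest, tmp, cands, i :: is => pvCandLoop rest tmp (pvCreateCands rest (tmp ++ [i]) cands) is
  termination_by rest _ _ is => (rest.length, is.length + 1)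
end

-- A's per-cand rebuild loop, state (i, pat)
def pvBuildPatA (qrypat : List String) (cand : List Int) : List String :=
  (qrypat.foldl (fun (st : Int × List String) t =>
      if pvBrace t then
        (st.1 + 1,
         (PySem.List.pyRange 0 (PySem.List.pyGetD cand st.1 0) 1).foldl (fun p _ => p ++ ["$"]) st.2)
      else (st.1, st.2 ++ [t]))
    ((0 : Int), ([] : List String))).2

def qrypat2pats (qrypat : List String) : List (List String) :=
  let cands := pvCreateCands qrypat [] []
  if cands.length = 0 then
    [qrypat.foldl (fun pat t => pat ++ [t]) []]
  else
    cands.foldl (fun pats cand => pats ++ [pvBuildPatA qrypat cand]) []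

-- ===== PORT B =====
-- B's rebuild: 'it = iter(cand)' consumed one entry per brace token = structural recursion on qrypat taking cand's head
def pvBuildPatB : List String → List Int → List String
  | [], _ => []
  | t :: ts, cand =>
    if pvBrace t then
      List.replicate ((cand.headD 0).toNat) "$" ++ pvBuildPatB ts cand.tail
    else t :: pvBuildPatB ts cand

def qrypat2pats_alt (qrypat : List String) : List (List String) :=
  let ranges := (qrypat.filter pvBrace).map
      (fun t => PySem.List.pyRange (pvIntAt t 1) (pvIntAt t (-2) + 1) 1)
  let cands := ranges.foldl (fun cs r => cs.flatMap (fun c => r.map (fun i => c ++ [i]))) [[]]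
  if cands.isEmpty then [qrypat]
  else cands.map (pvBuildPatB qrypat)

-- ===== PRECONDITION & SPEC =====
-- Pre_ excludes tokens that make Python raise: an empty token (IndexError on t[0]) and a brace
-- token whose chars at 1 / -2 are not digits (ValueError in int()).  This also excludes some
-- inputs A still RETURNS on: a malformed brace token hidden behind an earlier empty {s..e}
-- range (s > e), which A's early-stopping recursion never parses; there B naturally raises ValueError.
def pvWF (l : List Char) : Bool :=
  decide (l ≠ []) &&
    (!((l.head? == some '{') && (l.getLast? == some '}')) ||
      ((l[1]?.getD ' ').isDigit && (l[l.length - 2]?.getD ' ').isDigit))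

def Pre_qrypat2pats (qrypat : List String) : Prop :=
  ∀ t ∈ qrypat, pvWF t.toList = true
instance (qrypat : List String) : Decidable (Pre_qrypat2pats qrypat) := by
  unfold Pre_qrypat2pats; infer_instance

def pvWitness_qrypat2pats : List String := ["ab", "{1.3}", "c"]

def Spec_qrypat2pats (qrypat : List String) (out : List (List String)) : Prop := out = qrypat2pats_alt qrypat
instance (qrypat : List String) (out : List (List String)) : Decidable (Spec_qrypat2pats qrypat out) := by unfold Spec_qrypat2pats; infer_instance

-- ===== CLAIM (what is proved, stated in full; the proofs are below) =====
def Claim_equal_qrypat2pats : Prop := ∀ (qrypat : List String), Dom_qrypat2pats qrypat → Pre_qrypat2pats qrypat → Spec_qrypat2pats qrypat (qrypat2pats qrypat)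

-- ===== LEMMAS AND PROOFS =====

-- the interleaved cartesian product A enumerates, in A's order
def pvProd : List String → List (List Int)
  | [] => [[]]
  | t :: rest =>
    if pvBrace t then
      (PySem.List.pyRange (pvIntAt t 1) (pvIntAt t (-2) + 1) 1).flatMap
        (fun i => (pvProd rest).map (i :: ·))
    else pvProd rest

def pvNB (qrypat : List String) : Nat := (qrypat.filter pvBrace).length

theorem length_mem_pvProd : ∀ {rest : List String} {c : List Int}, c ∈ pvProd rest → c.length = pvNB rest := by
  intro rest
  induction rest with
  | nil => intro c hc; simp [pvProd] at hc; simp [hc, pvNB]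
  | cons t rest ih =>
    intro c hc
    by_cases h : pvBrace t
    · simp [pvProd, h] at hc
      obtain ⟨i, _, d, hd, rfl⟩ := hc
      simp [pvNB, List.filter, h, ih hd]
    · simp [pvProd, h] at hc
      simp [pvNB, List.filter, h]
      exact ih hc

theorem pvProd_of_nb_zero : ∀ {rest : List String}, pvNB rest = 0 → pvProd rest = [[]] := by
  intro rest
  induction rest with
  | nil => intro _; rfl
  | cons t rest ih =>
    intro h
    by_cases hb : pvBrace t
    · simp [pvNB, List.filter, hb] at h
    · simp [pvNB, List.filter, hb] at h
      have : pvNB rest = 0 := by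
        simp [pvNB, List.filter_eq_nil_iff]; exact fun a ha => by simp [h a ha]
      simp [pvProd, hb, ih this]

theorem pvCandLoop_eq_of (rest : List String)
    (IH : ∀ tmp cands, pvCreateCands rest tmp cands
      = cands ++ ((pvProd rest).map (tmp ++ ·)).filter (fun l => !l.isEmpty)) :
    ∀ (is : List Int) (tmp : List Int) (cands : List (List Int)),
    pvCandLoop rest tmp cands is
      = cands ++ is.flatMap (fun i => ((pvProd rest).map ((tmp ++ [i]) ++ ·)).filter (fun l => !l.isEmpty)) := by
  intro is
  induction is with
  | nil => intro tmp cands; simp [pvCandLoop]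
  | cons i is ih =>
    intro tmp cands
    rw [pvCandLoop, ih, IH]
    simp

theorem pvCreateCands_eq : ∀ (rest : List String) (tmp : List Int) (cands : List (List Int)),
    pvCreateCands rest tmp cands
      = cands ++ ((pvProd rest).map (tmp ++ ·)).filter (fun l => !l.isEmpty) := by
  intro rest
  induction rest with
  | nil =>
    intro tmp cands
    cases tmp <;> simp [pvCreateCands, pvProd, List.filter]
  | cons t rest ih =>
    intro tmp cands
    by_cases h : pvBrace t
    · rw [pvCreateCands, if_pos h, pvCandLoop_eq_of rest ih]
      simp [pvProd, h, List.map_flatMap, List.filter_flatMap, List.map_map, Function.comp_def]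
    · rw [pvCreateCands, if_neg h, ih]
      simp [pvProd, h]

def pvProdR : List (List Int) → List (List Int)
  | [] => [[]]
  | r :: rs => r.flatMap (fun i => (pvProdR rs).map (i :: ·))

theorem foldl_prod_eq : ∀ (rs : List (List Int)) (cs : List (List Int)),
    rs.foldl (fun cs r => cs.flatMap (fun c => r.map (fun i => c ++ [i]))) cs
      = cs.flatMap (fun c => (pvProdR rs).map (c ++ ·)) := by
  intro rs
  induction rs with
  | nil => intro cs; simp [pvProdR]
  | cons r rs ih =>
    intro cs
    rw [List.foldl_cons, ih]
    simp only [pvProdR, List.flatMap_assoc, List.map_flatMap, List.flatMap_map, List.map_map, Function.comp_def]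
    simp [List.append_assoc]

theorem pvProdR_ranges : ∀ (qrypat : List String),
    pvProdR ((qrypat.filter pvBrace).map
      (fun t => PySem.List.pyRange (pvIntAt t 1) (pvIntAt t (-2) + 1) 1)) = pvProd qrypat := by
  intro q
  induction q with
  | nil => rfl
  | cons t rest ih =>
    by_cases h : pvBrace t
    · simp [List.filter, h, pvProdR, pvProd, ih]
    · simp [List.filter, h, pvProd, ih]

theorem pvBuildB_of_nb_zero : ∀ (ts : List String) (c : List Int), pvNB ts = 0 → pvBuildPatB ts c = ts := by
  intro ts
  induction ts with
  | nil => intro c _; rfl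
  | cons t ts ih =>
    intro c h
    by_cases hb : pvBrace t
    · simp [pvNB, List.filter, hb] at h
    · simp [pvNB, hb] at h
      have : pvNB ts = 0 := by
        simp [pvNB, List.filter_eq_nil_iff]; exact fun a ha => by simp [h a ha]
      simp [pvBuildPatB, hb, ih c this]

theorem foldl_dollar (l : List Int) : ∀ (pat : List String),
    l.foldl (fun p _ => p ++ ["$"]) pat = pat ++ List.replicate l.length "$" := by
  induction l with
  | nil => intro pat; simp
  | cons x l ih =>
    intro pat
    rw [List.foldl_cons, ih]
    simp [List.replicate_succ]

theorem pvBuildA_eq : ∀ (ts : List String) (full : List Int) (i : Nat) (pat : List String),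
    pvNB ts + i ≤ full.length →
    (ts.foldl (fun (st : Int × List String) t =>
        if pvBrace t then
          (st.1 + 1,
           (PySem.List.pyRange 0 (PySem.List.pyGetD full st.1 0) 1).foldl (fun p _ => p ++ ["$"]) st.2)
        else (st.1, st.2 ++ [t])) (((i : Nat) : Int), pat)).2
      = pat ++ pvBuildPatB ts (full.drop i) := by
  intro ts
  induction ts with
  | nil => intro full i pat _; simp [pvBuildPatB]
  | cons t ts ih =>
    intro full i pat hlen
    by_cases hb : pvBrace t
    · have hnb : pvNB (t :: ts) = pvNB ts + 1 := by simp [pvNB, List.filter, hb]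
      have hi : i < full.length := by omega
      rw [List.foldl_cons]
      simp only [hb, if_pos]
      rw [PySem.List.pyGetD_natCast]
      rw [foldl_dollar, PySem.List.length_pyRange_one]
      have : ((i : Int) + 1) = ((i + 1 : Nat) : Int) := by push_cast; ring
      rw [this, ih full (i + 1) _ (by omega)]
      have hget : full.getD i 0 = (full.drop i).headD 0 := by
        rw [List.getD_eq_getElem?_getD, List.headD_eq_head?_getD, List.head?_drop]
      have htail : (full.drop i).tail = full.drop (i + 1) := by
        rw [List.tail_drop]
      rw [pvBuildPatB, if_pos hb, hget, htail]
      simp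
    · have hnb : pvNB (t :: ts) = pvNB ts := by simp [pvNB, List.filter, hb]
      rw [List.foldl_cons]
      simp only [hb, if_neg, Bool.false_eq_true, not_false_eq_true]
      rw [ih full i _ (by omega)]
      rw [pvBuildPatB, if_neg (by simp [hb])]
      simp

theorem pvBuildPatA_eq_B (qrypat : List String) (cand : List Int)
    (h : pvNB qrypat ≤ cand.length) : pvBuildPatA qrypat cand = pvBuildPatB qrypat cand := by
  have := pvBuildA_eq qrypat cand 0 [] (by omega)
  simpa [pvBuildPatA] using this

theorem pvFlatten_singleton (q : List String) : (q.map (fun x => [x])).flatten = q := by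
  induction q with
  | nil => rfl
  | cons x q ih => simp [ih]

theorem ports_eq : ∀ (qrypat : List String), qrypat2pats qrypat = qrypat2pats_alt qrypat := by
  intro q
  have hA : pvCreateCands q [] [] = (pvProd q).filter (fun l => !l.isEmpty) := by
    rw [pvCreateCands_eq]; simp
  have hB : (((q.filter pvBrace).map
        (fun t => PySem.List.pyRange (pvIntAt t 1) (pvIntAt t (-2) + 1) 1)).foldl
        (fun cs r => cs.flatMap (fun c => r.map (fun i => c ++ [i]))) [[]]) = pvProd q := by
    rw [foldl_prod_eq, pvProdR_ranges]; simp
  rcases Nat.eq_zero_or_pos (pvNB q) with hnb | hnb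
  · -- no brace tokens: A's filter drops the single empty tuple (fallback copy), B maps over [[]]
    have hP : pvProd q = [[]] := pvProd_of_nb_zero hnb
    simp only [qrypat2pats, qrypat2pats_alt, hA, hB, hP]
    simp [pvBuildB_of_nb_zero q [] hnb, PySem.List.foldl_append_singleton_eq_self, pvFlatten_singleton]
  · have hfil : (pvProd q).filter (fun l => !l.isEmpty) = pvProd q := by
      apply List.filter_eq_self.mpr
      intro c hc
      have := length_mem_pvProd hc
      simp
      intro hcnil; rw [hcnil] at this; simp at this; omega
    rcases eq_or_ne (pvProd q) [] with hP | hP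
    · -- some brace range is empty: both sides fall back to a copy of qrypat
      simp only [qrypat2pats, qrypat2pats_alt, hA, hB, hP]
      simp [pvFlatten_singleton]
    · simp only [qrypat2pats, qrypat2pats_alt, hA, hB, hfil]
      rw [if_neg (by simp [hP]), if_neg (by simp [List.isEmpty_iff, hP])]
      have hfold : (pvProd q).foldl (fun pats cand => pats ++ [pvBuildPatA q cand]) []
          = (pvProd q).map (pvBuildPatA q) := by
        simpa using PySem.List.foldl_append_singleton_eq_map (l := pvProd q) (f := pvBuildPatA q) (acc := [])
      rw [hfold]
      apply List.map_congr_left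
      intro c hc
      exact pvBuildPatA_eq_B q c (by rw [length_mem_pvProd hc])

-- ===== VERDICT (by name: the statement is the Claim_ definition above) =====
theorem qrypat2pats_spec : Claim_equal_qrypat2pats := by
  intro qrypat _ _
  unfold Spec_qrypat2pats
  exact ports_eq qrypat
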